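-- pv_equiv track=rewrite | github.com/sabinomaggi/pico-camera5mp | pico_ov5642/extract_regs.py | to_bytes_string
-- ===== SOURCE A (Python) =====
-- def to_bytes_string(pairs):
--     if not pairs:
--         return "b''"
--
--     lines = []
--     current_line = []
--     for addr, val in pairs:
--         current_line.append(f"\\x{(addr >> 8) & 0xFF:02x}\\x{addr & 0xFF:02x}\\x{val & 0xFF:02x}")
--         if len(current_line) >= 20:
--             lines.append("b'" + "".join(current_line) + "'")
--             current_line = []
--
--     if current_line:
--         lines.append("b'" + "".join(current_line) + "'")
--
--     return "(\n    " + "\n    ".join(lines) + "\n)"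
-- ===== SOURCE B (Python) =====
-- def to_bytes_string(pairs):
--     if not pairs:
--         return "b''"
--     items = ["\\x{:02x}\\x{:02x}\\x{:02x}".format((addr >> 8) & 0xFF, addr & 0xFF, val & 0xFF)
--              for addr, val in pairs]
--     lines = []
--     while items:
--         lines.append("b'" + "".join(items[:20]) + "'")
--         items = items[20:]
--     return "(\n    " + "\n    ".join(lines) + "\n)"
-- ===== Notes on version B (the rewrite author's own statement) =====
-- stated objective: simpler
-- what changed: Replaces A's single loop with inline accumulate-and-flush counter state by a two-phase decomposition: format every pair with one comprehension, then chunk the formatted items into lines of 20 by repeated slicing.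
import Mathlib
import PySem

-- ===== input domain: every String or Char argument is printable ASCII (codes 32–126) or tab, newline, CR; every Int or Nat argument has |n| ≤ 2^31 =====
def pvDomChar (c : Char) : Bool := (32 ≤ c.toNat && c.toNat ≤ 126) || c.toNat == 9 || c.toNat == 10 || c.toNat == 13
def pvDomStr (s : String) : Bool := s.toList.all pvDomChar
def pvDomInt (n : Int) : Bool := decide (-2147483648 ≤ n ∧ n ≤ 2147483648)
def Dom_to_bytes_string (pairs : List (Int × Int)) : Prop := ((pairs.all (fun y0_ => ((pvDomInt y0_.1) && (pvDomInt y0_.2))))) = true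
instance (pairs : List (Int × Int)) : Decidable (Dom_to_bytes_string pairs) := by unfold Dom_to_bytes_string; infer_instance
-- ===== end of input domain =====

-- B replaces A's inline accumulate-and-flush counter with a map (format every pair) followed by
-- slice-based chunking into groups of 20; objective: simpler decomposition, same output.

-- shared helper: the f-string "\\x{(addr>>8)&0xFF:02x}\\x{addr&0xFF:02x}\\x{val&0xFF:02x}",
-- transliterated by hand; '%02x' is exact here because each masked value lies in [0,255],
-- so the hex rendering is exactly two lowercase digits.
def hexDigit (n : Nat) : Char := if n < 10 then Char.ofNat (48 + n) else Char.ofNat (87 + n)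
def hex2 (n : Int) : String := String.ofList [hexDigit (n.toNat / 16), hexDigit (n.toNat % 16)]
def fmtPair (p : Int × Int) : String :=
  "\\x" ++ hex2 (PySem.Int.band (p.1 >>> (8 : Nat)) 255)
    ++ "\\x" ++ hex2 (PySem.Int.band p.1 255)
    ++ "\\x" ++ hex2 (PySem.Int.band p.2 255)

-- ===== PORT A =====
-- loop state = (lines, current_line); flush when current_line reaches 20
def stepA (st : List String × List String) (p : Int × Int) : List String × List String :=
  let cur := st.2 ++ [fmtPair p]
  if cur.length ≥ 20 then (st.1 ++ ["b'" ++ String.join cur ++ "'"], []) else (st.1, cur)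

def to_bytes_string (pairs : List (Int × Int)) : String :=
  match pairs with
  | [] => "b''"
  | _ =>
    let st := pairs.foldl stepA ([], [])
    let lines := if st.2 ≠ [] then st.1 ++ ["b'" ++ String.join st.2 ++ "'"] else st.1
    "(\n    " ++ String.intercalate "\n    " lines ++ "\n)"

-- ===== PORT B =====
-- Source B's while loop: emit a line from items[:20], continue with items[20:];
-- the slices have nonnegative bounds, where Python slicing is exactly take/drop.
def chunkLines (items : List String) : List String :=
  if items.isEmpty then []
  else ("b'" ++ String.join (items.take 20) ++ "'") :: chunkLines (items.drop 20)
termination_by items.length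
decreasing_by simp_all; cases items <;> simp_all

def to_bytes_string_alt (pairs : List (Int × Int)) : String :=
  if pairs.isEmpty then "b''"
  else "(\n    " ++ String.intercalate "\n    " (chunkLines (pairs.map fmtPair)) ++ "\n)"

-- ===== PRECONDITION & SPEC =====
def Spec_to_bytes_string (pairs : List (Int × Int)) (out : String) : Prop := out = to_bytes_string_alt pairs
instance (pairs : List (Int × Int)) (out : String) : Decidable (Spec_to_bytes_string pairs out) := by unfold Spec_to_bytes_string; infer_instance

-- ===== CLAIM (what is proved, stated in full; the proofs are below) =====
def Claim_equal_to_bytes_string : Prop := ∀ (pairs : List (Int × Int)), Dom_to_bytes_string pairs → Spec_to_bytes_string pairs (to_bytes_string pairs)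

-- ===== LEMMAS AND PROOFS =====

-- A's loop over strings (A's loop factors through fmtPair via List.foldl_map)
def stepS (st : List String × List String) (s : String) : List String × List String :=
  let cur := st.2 ++ [s]
  if cur.length ≥ 20 then (st.1 ++ ["b'" ++ String.join cur ++ "'"], []) else (st.1, cur)

-- A's loop + final flush, expressed recursively
def chunkAux (cur : List String) : List String → List String
  | [] => if cur ≠ [] then ["b'" ++ String.join cur ++ "'"] else []
  | s :: rest =>
      let cur' := cur ++ [s]
      if cur'.length ≥ 20 then ("b'" ++ String.join cur' ++ "'") :: chunkAux [] rest
      else chunkAux cur' rest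

theorem foldS_chunkAux (items : List String) : ∀ (lines cur : List String),
    (let st := items.foldl stepS (lines, cur)
     if st.2 ≠ [] then st.1 ++ ["b'" ++ String.join st.2 ++ "'"] else st.1)
      = lines ++ chunkAux cur items := by
  induction items with
  | nil =>
    intro lines cur
    simp only [List.foldl_nil, chunkAux]
    split <;> simp_all
  | cons s rest ih =>
    intro lines cur
    simp only [List.foldl_cons, chunkAux, stepS]
    split
    · rw [ih]; simp
    · rw [ih]

theorem chunkAux_eq_chunkLines (items : List String) : ∀ (cur : List String),
    cur.length < 20 → chunkAux cur items = chunkLines (cur ++ items) := by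
  induction items with
  | nil =>
    intro cur h
    rw [chunkLines]
    simp only [List.append_nil, chunkAux]
    rcases cur with _ | ⟨c, cs⟩
    · simp
    · rw [if_pos (by simp), show ((c :: cs).isEmpty = false) from rfl]
      simp only [Bool.false_eq_true, if_false]
      rw [List.take_of_length_le (by omega), List.drop_eq_nil_of_le (by omega), chunkLines]
      simp
  | cons s rest ih =>
    intro cur h
    simp only [chunkAux]
    by_cases h20 : (cur ++ [s]).length ≥ 20
    · have hlen : (cur ++ [s]).length = 20 := by simp at h20 ⊢; omega
      rw [if_pos h20, ih [] (by simp)]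
      conv_rhs => rw [chunkLines]
      have hne : (cur ++ s :: rest).isEmpty = false := by
        simp
      rw [hne]
      simp only [Bool.false_eq_true, if_false]
      have : cur ++ s :: rest = (cur ++ [s]) ++ rest := by simp
      rw [this, List.take_left' hlen, List.drop_left' hlen]
      simp
    · rw [if_neg h20, ih (cur ++ [s]) (by simp at h20 ⊢; omega)]
      simp

-- ===== VERDICT (by name: the statement is the Claim_ definition above) =====
theorem to_bytes_string_spec : Claim_equal_to_bytes_string := by
  intro pairs _
  unfold Spec_to_bytes_string to_bytes_string to_bytes_string_alt
  cases pairs with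
  | nil => rfl
  | cons p ps =>
    rw [show ((p :: ps).isEmpty = false) from rfl]
    simp only [Bool.false_eq_true, if_false]
    have hmap : (p :: ps).foldl stepA ([], []) = ((p :: ps).map fmtPair).foldl stepS ([], []) := by
      rw [List.foldl_map]; rfl
    rw [hmap, foldS_chunkAux, chunkAux_eq_chunkLines _ [] (by simp)]
    simp
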